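-- pv_equiv track=rewrite | github.com/AytaDzhivanov1996/homework_1 | solve.py | solve
-- ===== SOURCE A (Python) =====
-- def solve(n, repeats):
--     summa = []
--     counter = 1
--     while counter <= repeats:
--         elem = str(n)*counter
--         summa.append(int(elem))
--         counter += 1
--     return sum(summa)
-- ===== SOURCE B (Python) =====
-- def solve(n, repeats):
--     if repeats <= 0:
--         return 0
--     d = len(str(abs(n)))
--     m = 10 ** d
--     repunit_sum = ((m ** (repeats + 1) - m) // (m - 1) - repeats) // (m - 1)
--     return n * repunit_sum
-- ===== Notes on version B (the rewrite author's own statement) =====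
-- stated objective: faster
-- what changed: A builds each of the repeats strings str(n)*k and re-parses them with int() before summing (quadratic-size work); B computes the same sum in closed form as n times a geometric repunit sum using big-int pow and two exact integer divisions.
import Mathlib
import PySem

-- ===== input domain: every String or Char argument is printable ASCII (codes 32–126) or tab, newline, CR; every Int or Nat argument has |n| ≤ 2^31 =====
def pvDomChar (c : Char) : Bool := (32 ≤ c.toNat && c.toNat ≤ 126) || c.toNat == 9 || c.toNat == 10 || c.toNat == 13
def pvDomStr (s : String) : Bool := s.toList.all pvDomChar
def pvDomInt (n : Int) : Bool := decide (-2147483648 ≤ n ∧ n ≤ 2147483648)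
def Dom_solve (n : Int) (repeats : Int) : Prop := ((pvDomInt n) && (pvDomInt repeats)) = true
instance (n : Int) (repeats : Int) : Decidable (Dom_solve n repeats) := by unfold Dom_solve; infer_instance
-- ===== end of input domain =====

-- B replaces A's quadratic repeat-and-reparse loop by a closed-form geometric sum (objective: faster).

-- ===== PORT A =====
-- while counter <= repeats: summa.append(int(str(n)*counter)); counter += 1  — the while loop
-- counting 1,2,…,repeats is folded over range(1, repeats+1); the appended parse results are
-- threaded as Option (none = int() raised ValueError, excluded by Pre_solve).
def solve (n : Int) (repeats : Int) : Int :=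
  let summa : Option (List Int) :=
    (PySem.List.pyRange 1 (repeats + 1) 1).foldl
      (fun acc counter =>
        acc.bind (fun s =>
          (PySem.Int.ofChars? (PySem.List.pyRepeat (PySem.Int.toChars n) counter)).map
            (fun e => s ++ [e])))
      (some [])
  match summa with
  | some l => l.sum
  | none => 0  -- unreachable under Pre_solve (int(elem) raised ValueError)

-- ===== PORT B =====
def solve_alt (n : Int) (repeats : Int) : Int :=
  if repeats ≤ 0 then 0
  else
    let d : Nat := (PySem.Int.toChars |n|).length      -- len(str(abs(n)))
    let m : Int := 10 ^ d
    let repunitSum : Int :=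
      PySem.Int.floordiv
        (PySem.Int.floordiv (m ^ (repeats + 1).toNat - m) (m - 1) - repeats)
        (m - 1)
    n * repunitSum

-- ===== PRECONDITION & SPEC =====
-- Pre_ excludes n < 0 with repeats ≥ 2: there A's int(str(n)*counter) raises ValueError
-- (e.g. int("-3-3")), so A returns no value.
def Pre_solve (n : Int) (repeats : Int) : Prop := 0 ≤ n ∨ repeats ≤ 1
instance (n : Int) (repeats : Int) : Decidable (Pre_solve n repeats) := by unfold Pre_solve; infer_instance
def pvWitness_solve : Int × Int := (7, 3)

def Spec_solve (n : Int) (repeats : Int) (out : Int) : Prop := out = solve_alt n repeats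
instance (n : Int) (repeats : Int) (out : Int) : Decidable (Spec_solve n repeats out) := by unfold Spec_solve; infer_instance

-- ===== CLAIM (what is proved, stated in full; the proofs are below) =====
def Claim_equal_solve : Prop := ∀ (n : Int) (repeats : Int), Dom_solve n repeats → Pre_solve n repeats → Spec_solve n repeats (solve n repeats)

-- ===== LEMMAS AND PROOFS =====

/-! ### Decimal parsing: `PySem.Int.ofChars?` on pure digit strings -/

/-- Left-to-right decimal value of a digit string, starting from accumulator `a`. -/
def dval (a : Nat) (cs : List Char) : Nat := cs.foldl (fun x c => x * 10 + (c.toNat - '0'.toNat)) a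

theorem dropWhile_self_of_all {p : Char → Bool} {l : List Char} (h : ∀ c ∈ l, p c = false) :
    l.dropWhile p = l :=
  List.dropWhile_eq_self_iff.mpr (fun hl => by simp [h _ (l.getElem_mem hl)])

theorem digit_not_space {c : Char} (h : c.isDigit = true) : PySem.Int.isIntSpace c = false := by
  simp [Char.isDigit] at h
  simp [PySem.Int.isIntSpace]
  refine ⟨⟨⟨⟨⟨?_, ?_⟩, ?_⟩, ?_⟩, ?_⟩, ?_⟩ <;> (intro he; subst he; simp at h)

/-- Behaviour of the (private) digit-scanning loop of `PySem.Int.ofChars?`, characterised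
abstractly: any `g` satisfying its two unfolding equations returns the decimal value on a
pure digit string. `g` is instantiated with the private loop by unification in `dv_capture`. -/
theorem go_spec (g : List Char → Bool → Nat → Option Nat)
    (hnil : ∀ b a, g [] b a = if b = true then some a else none)
    (hcons : ∀ c rest b a, g (c :: rest) b a =
      if c.isDigit = true then g rest true (a * 10 + (c.toNat - '0'.toNat))
      else if c = '_' ∧ b = true then
          (match rest with
           | e :: _ => if e.isDigit = true then g rest false a else none
           | [] => none)
        else none) :
    ∀ ds b a, (∀ c ∈ ds, c.isDigit = true) → (b = true ∨ ds ≠ []) →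
      g ds b a = some (dval a ds) := by
  intro ds
  induction ds with
  | nil =>
    intro b a _ hb
    rcases hb with hb | hb
    · simp [hnil, hb, dval]
    · simp at hb
  | cons c rest ih =>
    intro b a hdig _
    have hc : c.isDigit = true := hdig c (by simp)
    rw [hcons, if_pos hc]
    cases rest with
    | nil => rw [hnil]; simp [dval]
    | cons e tail =>
      rw [ih true _ (fun x hx => hdig x (by simp [hx])) (Or.inl rfl)]
      simp [dval]

/-- Capture lemma: `h` is (by unification) the private `digitsVal?` of `ofChars?`, `g` its
private loop; the hypotheses are discharged by `rfl` at the call sites. -/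
theorem dv_capture {g : List Char → Bool → Nat → Option Nat} {f : Int → Int}
    (h : List Char → Option Nat)
    (hh : ∀ c cs, h (c :: cs) =
      if c.isDigit = true then g cs true (0 * 10 + (c.toNat - '0'.toNat))
      else if c = '_' ∧ false = true then
          (match cs with
           | e :: _ => if e.isDigit = true then g cs false 0 else none
           | [] => none)
        else none)
    (hnil : ∀ b a, g [] b a = if b = true then some a else none)
    (hcons : ∀ c rest b a, g (c :: rest) b a =
      if c.isDigit = true then g rest true (a * 10 + (c.toNat - '0'.toNat))
      else if c = '_' ∧ b = true then
          (match rest with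
           | e :: _ => if e.isDigit = true then g rest false a else none
           | [] => none)
        else none)
    (d : Char) (tail : List Char) (hd : ∀ c ∈ d :: tail, c.isDigit = true) :
    (Option.map f (do
        let a ← h (d :: tail)
        pure ((a : Nat) : Int))) = some (f ((dval 0 (d :: tail) : Nat) : Int)) := by
  have hdd : d.isDigit = true := hd d (by simp)
  rw [hh, if_pos hdd]
  cases tail with
  | nil =>
    rw [hnil]
    simp [dval]
  | cons e tl =>
    rw [go_spec g hnil hcons _ true _ (fun x hx => hd x (by simp [hx])) (Or.inl rfl)]
    simp [dval]

/-- `int(s)` on a nonempty pure digit string is its decimal value. -/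
theorem ofChars?_digits (ds : List Char) (hne : ds ≠ [])
    (hd : ∀ c ∈ ds, c.isDigit = true) :
    PySem.Int.ofChars? ds = some ((dval 0 ds : Nat) : Int) := by
  cases ds with
  | nil => exact absurd rfl hne
  | cons d tail =>
  unfold PySem.Int.ofChars?
  have hds : ∀ c ∈ d :: tail, PySem.Int.isIntSpace c = false := fun c hc => digit_not_space (hd c hc)
  rw [dropWhile_self_of_all hds,
      dropWhile_self_of_all (fun c hc => hds c (List.mem_reverse.mp hc)),
      List.reverse_reverse]
  dsimp only
  split
  · next ds heq =>
    exfalso; cases heq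
    have := hd '-' (by simp); simp at this
  · next ds heq =>
    exfalso; cases heq
    have := hd '+' (by simp); simp at this
  · next ds h1 h2 =>
    apply dv_capture (f := fun z => z)
    · intro c cs; conv_lhs => whnf
      exact rfl
    · intro b a; exact rfl
    · intro c rest b a; exact rfl
    · exact hd

/-- `int(s)` on `'-'` followed by a nonempty pure digit string. -/
theorem ofChars?_neg_digits (ds : List Char) (hne : ds ≠ [])
    (hd : ∀ c ∈ ds, c.isDigit = true) :
    PySem.Int.ofChars? ('-' :: ds) = some (-((dval 0 ds : Nat) : Int)) := by
  unfold PySem.Int.ofChars?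
  have hds : ∀ c ∈ '-' :: ds, PySem.Int.isIntSpace c = false := by
    intro c hc
    rcases List.mem_cons.mp hc with h | h
    · subst h; rfl
    · exact digit_not_space (hd c h)
  rw [dropWhile_self_of_all hds,
      dropWhile_self_of_all (fun c hc => hds c (List.mem_reverse.mp hc)),
      List.reverse_reverse]
  dsimp only
  split
  · next ds' heq =>
    obtain ⟨rfl⟩ : ds = ds' := by cases heq; rfl
    cases ds with
    | nil => exact absurd rfl hne
    | cons d tail =>
      apply dv_capture (f := fun z => -z)
      · intro c cs; conv_lhs => whnf
        exact rfl
      · intro b a; exact rfl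
      · intro c rest b a; exact rfl
      · exact hd
  · next ds' heq => cases heq
  · next ds' h1 h2 => exact absurd rfl (h1 ds)

/-! ### `Nat.toDigits` roundtrip -/

theorem digitChar_sub {k : Nat} (h : k < 10) : (Nat.digitChar k).toNat - '0'.toNat = k := by
  interval_cases k <;> rfl

theorem dval_append (a : Nat) (u v : List Char) : dval a (u ++ v) = dval (dval a u) v := by
  simp [dval, List.foldl_append]

theorem dval_shift (v : List Char) : ∀ a, dval a v = a * 10 ^ v.length + dval 0 v := by
  induction v with
  | nil => intro a; simp [dval]
  | cons c cs ih =>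
    intro a
    show dval (a * 10 + (c.toNat - '0'.toNat)) cs = a * 10 ^ (c :: cs).length + dval (0 * 10 + (c.toNat - '0'.toNat)) cs
    rw [ih, ih (0 * 10 + (c.toNat - '0'.toNat))]
    simp [List.length_cons, pow_succ]
    ring

theorem dval_toDigits (m : Nat) : dval 0 (Nat.toDigits 10 m) = m := by
  induction m using Nat.strong_induction_on with
  | _ m ih =>
    rw [Nat.toDigits_eq_if (by norm_num)]
    split
    · next h => simpa [dval] using digitChar_sub h
    · next h =>
      rw [dval_append, ih (m / 10) (by omega)]
      have h10 : m % 10 < 10 := Nat.mod_lt _ (by norm_num)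
      show (m / 10) * 10 + ((m % 10).digitChar.toNat - '0'.toNat) = m
      rw [digitChar_sub h10]
      omega

theorem toDigits_digit {m : Nat} : ∀ c ∈ Nat.toDigits 10 m, c.isDigit = true :=
  fun _ hc => Nat.isDigit_of_mem_toDigits (by norm_num) (by norm_num) hc

theorem toDigits_ne_nil {m : Nat} : Nat.toDigits 10 m ≠ [] :=
  List.ne_nil_of_length_pos Nat.length_toDigits_pos

theorem toChars_nonneg {n : Int} (h : 0 ≤ n) :
    PySem.Int.toChars n = Nat.toDigits 10 n.toNat := by
  simp [PySem.Int.toChars, not_lt.mpr h]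

theorem toChars_neg {n : Int} (h : n < 0) :
    PySem.Int.toChars n = '-' :: Nat.toDigits 10 n.natAbs := by
  simp [PySem.Int.toChars, h]

/-! ### Value of a repeated digit string -/

/-- `1 + M + … + M^(k-1)`: the base-`M` "repunit" with `k` ones. -/
def repI (M : Int) : Nat → Int
  | 0 => 0
  | k + 1 => M ^ k + repI M k

/-- `g 1 + g 2 + … + g r`. -/
def psum (g : Nat → Int) : Nat → Int
  | 0 => 0
  | r + 1 => psum g r + g (r + 1)

theorem pyRepeat_succ (xs : List Char) (k : Nat) :
    PySem.List.pyRepeat xs ((k + 1 : Nat) : Int) = xs ++ PySem.List.pyRepeat xs (k : Int) := by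
  simp [PySem.List.pyRepeat, List.replicate_succ]

theorem mem_pyRepeat {xs : List Char} {k : Int} {c : Char} (h : c ∈ PySem.List.pyRepeat xs k) :
    c ∈ xs := by
  simp only [PySem.List.pyRepeat, List.mem_flatten] at h
  obtain ⟨l, hl, hc⟩ := h
  rwa [List.eq_of_mem_replicate hl] at hc

theorem length_pyRepeat (xs : List Char) (k : Nat) :
    (PySem.List.pyRepeat xs (k : Int)).length = k * xs.length := by
  induction k with
  | zero => simp [PySem.List.pyRepeat]
  | succ k ih => rw [pyRepeat_succ, List.length_append, ih]; ring

theorem dval_pyRepeat (ds : List Char) (k : Nat) :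
    ((dval 0 (PySem.List.pyRepeat ds (k : Int)) : Nat) : Int)
      = ((dval 0 ds : Nat) : Int) * repI ((10 : Int) ^ ds.length) k := by
  induction k with
  | zero => simp [PySem.List.pyRepeat, dval, repI]
  | succ k ih =>
    rw [pyRepeat_succ, dval_append, dval_shift, length_pyRepeat, repI]
    push_cast
    rw [ih]
    ring

/-! ### A's loop -/

theorem foldl_bind_map (P : Int → Option Int) (f : Int → Int) :
    ∀ (ks : List Int), (∀ k ∈ ks, P k = some (f k)) → ∀ l : List Int,
      ks.foldl (fun acc counter => acc.bind (fun s => (P counter).map (fun e => s ++ [e])))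
          (some l)
        = some (l ++ ks.map f) := by
  intro ks
  induction ks with
  | nil => intro _ l; simp
  | cons k ks ih =>
    intro h l
    simp only [List.foldl_cons, Option.bind_some, h k (by simp), Option.map_some]
    rw [ih (fun x hx => h x (by simp [hx]))]
    simp

theorem map_sum_pyRange (f : Int → Int) (g : Nat → Int)
    (hfg : ∀ j : Nat, 1 ≤ j → f (j : Int) = g j) :
    ∀ r : Nat, ((PySem.List.pyRange 1 ((r : Int) + 1) 1).map f).sum = psum g r := by
  intro r
  induction r with
  | zero => rw [PySem.List.pyRange_one_eq_nil (by norm_num)]; simp [psum]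
  | succ r ih =>
    have : ((r : Int) + 1) + 1 = (((r : Int) + 1)) + 1 := rfl
    rw [show ((r + 1 : Nat) : Int) + 1 = ((r : Int) + 1) + 1 by push_cast; ring,
        PySem.List.pyRange_one_succ_right (by omega)]
    simp only [List.map_append, List.sum_append, ih, List.map_cons, List.map_nil]
    rw [show (r : Int) + 1 = ((r + 1 : Nat) : Int) by push_cast; ring, hfg (r + 1) (by omega)]
    simp [psum]

/-! ### B's closed form -/

theorem repI_pred (M : Int) (k : Nat) : (M - 1) * repI M k = M ^ k - 1 := by
  induction k with
  | zero => simp [repI]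
  | succ k ih => rw [repI, mul_add, ih]; ring

/-- `M + M² + … + M^r`. -/
def geomI (M : Int) : Nat → Int
  | 0 => 0
  | r + 1 => geomI M r + M ^ (r + 1)

theorem geomI_pred (M : Int) (r : Nat) : (M - 1) * geomI M r = M ^ (r + 1) - M := by
  induction r with
  | zero => simp [geomI]
  | succ r ih => rw [geomI, mul_add, ih]; ring

theorem psum_repI (M : Int) (r : Nat) : (M - 1) * psum (repI M) r = geomI M r - r := by
  induction r with
  | zero => simp [psum, geomI]
  | succ r ih => rw [psum, geomI, mul_add, ih, repI_pred]; push_cast; ring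

theorem psum_mul (c : Int) (g : Nat → Int) (r : Nat) :
    psum (fun j => c * g j) r = c * psum g r := by
  induction r with
  | zero => simp [psum]
  | succ r ih => rw [psum, psum, ih]; ring

theorem floordiv_mul_cancel {M q : Int} (h : 0 < M) (x : Int) (hx : x = M * q) :
    PySem.Int.floordiv x M = q := by
  rw [PySem.Int.floordiv_eq_ediv_of_pos h, hx, Int.mul_ediv_cancel_left _ (by omega)]

theorem solve_alt_eval (n : Int) (r : Nat) (hr : 1 ≤ r) :
    solve_alt n (r : Int) = n * psum (repI ((10 : Int) ^ (PySem.Int.toChars |n|).length)) r := by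
  unfold solve_alt
  rw [if_neg (by omega)]
  dsimp only
  set d : Nat := (PySem.Int.toChars |n|).length with hd
  set M : Int := (10 : Int) ^ d with hM
  have hd1 : 1 ≤ d := by
    rw [hd, toChars_nonneg (abs_nonneg n)]
    exact Nat.length_toDigits_pos
  have hM10 : (10 : Int) ≤ M := by
    calc (10 : Int) = 10 ^ 1 := by norm_num
    _ ≤ 10 ^ d := by exact pow_le_pow_right₀ (by norm_num) hd1
  have hpos : 0 < M - 1 := by omega
  have hexp : ((r : Int) + 1).toNat = r + 1 := by omega
  rw [hexp]
  have h1 : PySem.Int.floordiv (M ^ (r + 1) - M) (M - 1) = geomI M r :=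
    floordiv_mul_cancel hpos _ (by rw [← geomI_pred])
  have h2 : PySem.Int.floordiv (geomI M r - (r : Int)) (M - 1) = psum (repI M) r :=
    floordiv_mul_cancel hpos _ (by rw [← psum_repI])
  rw [h1, h2]

/-! ### Assembly -/

theorem solve_eval_nonneg (n : Int) (hn : 0 ≤ n) (r : Nat) :
    solve n (r : Int) = n * psum (repI ((10 : Int) ^ (PySem.Int.toChars n).length)) r := by
  unfold solve
  set ds : List Char := PySem.Int.toChars n with hds
  set M : Int := (10 : Int) ^ ds.length with hM
  have hdig : ∀ c ∈ ds, c.isDigit = true := by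
    rw [hds, toChars_nonneg hn]; exact toDigits_digit
  have hvds : ((dval 0 ds : Nat) : Int) = n := by
    rw [hds, toChars_nonneg hn, dval_toDigits]; omega
  have hP : ∀ k ∈ PySem.List.pyRange 1 ((r : Int) + 1) 1,
      PySem.Int.ofChars? (PySem.List.pyRepeat ds k) = some (n * repI M k.toNat) := by
    intro k hk
    have hk1 : 1 ≤ k := (PySem.List.mem_pyRange_one.mp hk).1
    have hkn : k = (k.toNat : Int) := by omega
    have hne : PySem.List.pyRepeat ds k ≠ [] := by
      rw [hkn]
      obtain ⟨j, hj⟩ : ∃ j : Nat, k.toNat = j + 1 := ⟨k.toNat - 1, by omega⟩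
      rw [hj, pyRepeat_succ]
      have : ds ≠ [] := by rw [hds, PySem.Int.toChars]; split <;> simp [toDigits_ne_nil]
      simp [this]
    rw [ofChars?_digits _ hne (fun c hc => hdig c (mem_pyRepeat hc))]
    rw [hkn, dval_pyRepeat, hvds, ← hM, Int.toNat_natCast]
  rw [foldl_bind_map _ (fun k => n * repI M k.toNat) _ hP []]
  simp only [List.nil_append]
  show ((PySem.List.pyRange 1 ((r : Int) + 1) 1).map (fun k => n * repI M k.toNat)).sum
      = n * psum (repI M) r
  rw [map_sum_pyRange (fun k => n * repI M k.toNat) (fun j => n * repI M j)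
        (fun j _ => by simp)]
  exact psum_mul n (repI M) r

theorem solve_spec' (n repeats : Int) (hpre : Pre_solve n repeats) :
    solve n repeats = solve_alt n repeats := by
  by_cases hr : repeats ≤ 0
  · unfold solve solve_alt
    rw [PySem.List.pyRange_one_eq_nil (by omega), if_pos hr]
    simp
  · rw [not_le] at hr
    obtain ⟨r, hr', hrr⟩ : ∃ r : Nat, repeats = (r : Int) ∧ 1 ≤ r :=
      ⟨repeats.toNat, by omega, by omega⟩
    subst hr'
    rcases hpre with hn | h1
    · rw [solve_eval_nonneg n hn r, solve_alt_eval n r hrr, abs_of_nonneg hn]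
    · have : r = 1 := by omega
      subst this
      -- n may be negative here: repeats = 1, the single element is int(str(n)) = n
      rw [solve_alt_eval n 1 le_rfl]
      unfold solve
      rw [show ((1 : Nat) : Int) + 1 = 2 by norm_num,
          PySem.List.pyRange_one_cons (by norm_num),
          PySem.List.pyRange_one_eq_nil (by norm_num)]
      have hone : PySem.List.pyRepeat (PySem.Int.toChars n) 1 = PySem.Int.toChars n := by
        simp [PySem.List.pyRepeat]
      by_cases hn : 0 ≤ n
      · have := solve_eval_nonneg n hn 1
        rw [show ((1 : Nat) : Int) = 1 by norm_num] at this
        unfold solve at this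
        rw [show (1 : Int) + 1 = 2 by norm_num, PySem.List.pyRange_one_cons (by norm_num),
            PySem.List.pyRange_one_eq_nil (by norm_num)] at this
        rw [this, abs_of_nonneg hn]
      · rw [not_le] at hn
        simp only [List.foldl_cons, List.foldl_nil, Option.bind_some]
        rw [hone, toChars_neg hn,
            ofChars?_neg_digits _ toDigits_ne_nil toDigits_digit, dval_toDigits]
        have habs : PySem.Int.toChars |n| = Nat.toDigits 10 n.natAbs := by
          rw [toChars_nonneg (abs_nonneg n)]
          congr 1
          rcases le_or_gt 0 n with h | h
          · rw [abs_of_nonneg h]; omega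
          · rw [abs_of_neg h]; omega
        rw [habs]
        simp only [Option.map_some, psum, repI]
        have : -((n.natAbs : Nat) : Int) = n := by omega
        rw [this]
        simp

-- ===== VERDICT (by name: the statement is the Claim_ definition above) =====
theorem solve_spec : Claim_equal_solve := by
  intro n repeats _ hpre
  unfold Spec_solve
  exact solve_spec' n repeats hpre
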